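-- pv_equiv track=rewrite | github.com/WASasquatch/WAS_Extras | modules/cli/lora_spec.py | derive_schema_prefixes
-- ===== SOURCE A (Python) =====
-- from collections import Counter
--
-- def derive_schema_prefixes(keys, max_depth: int = 4) -> Counter:
--     separators = [".", "/", ":", "_"]
--     counts = Counter()
--
--     for key in keys:
--         parts = [key]
--         for sep in separators:
--             new_parts = []
--             for p in parts:
--                 new_parts.extend(p.split(sep))
--             parts = new_parts
--
--         parts = [p for p in parts if p]
--         if not parts:
--             continue
--
--         depth = min(max_depth, len(parts))
--         prefix = ".".join(parts[:depth])
--         counts[prefix] += 1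
--
--     return counts
-- ===== SOURCE B (Python) =====
-- from collections import Counter
--
-- def derive_schema_prefixes(keys, max_depth: int = 4) -> Counter:
--     seps = {".", "/", ":", "_"}
--     counts = Counter()
--
--     for key in keys:
--         # one pass: scan characters, emitting non-empty tokens directly
--         parts = []
--         cur = []
--         for ch in key:
--             if ch in seps:
--                 if cur:
--                     parts.append("".join(cur))
--                     cur = []
--             else:
--                 cur.append(ch)
--         if cur:
--             parts.append("".join(cur))
--
--         if parts:
--             depth = min(max_depth, len(parts))
--             counts[".".join(parts[:depth])] += 1
--
--     return counts
-- ===== Notes on version B (the rewrite author's own statement) =====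
-- stated objective: alternative
-- what changed: Replaces A's four sequential split passes over a growing parts list (one per separator) plus a truthiness-filter pass with a single character-scan tokenizer pass per key that emits non-empty tokens directly.
import Mathlib
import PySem

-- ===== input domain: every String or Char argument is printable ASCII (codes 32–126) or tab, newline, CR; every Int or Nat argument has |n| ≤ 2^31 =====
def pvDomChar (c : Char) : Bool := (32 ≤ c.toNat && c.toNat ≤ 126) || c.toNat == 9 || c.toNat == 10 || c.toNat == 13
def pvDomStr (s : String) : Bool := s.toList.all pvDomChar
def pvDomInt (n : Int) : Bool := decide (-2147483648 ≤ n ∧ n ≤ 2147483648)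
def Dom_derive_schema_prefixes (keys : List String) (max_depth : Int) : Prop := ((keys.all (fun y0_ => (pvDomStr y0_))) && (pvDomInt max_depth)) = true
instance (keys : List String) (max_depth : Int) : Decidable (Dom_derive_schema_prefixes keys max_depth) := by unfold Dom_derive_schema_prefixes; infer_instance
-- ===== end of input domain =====

-- B replaces A's four sequential split passes over a growing parts list by one
-- character-scan tokenizer pass per key emitting non-empty tokens directly
-- (objective: alternative decomposition).

-- ===== PORT A =====
def pvSepsA : List String := [".", "/", ":", "_"]

-- every sep in pvSepsA is a nonempty literal, so `split?` is always `some`; `.getD []` is never taken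
def derive_schema_prefixes (keys : List String) (max_depth : Int) : List (String × Int) :=
  (keys.foldl (fun (counts : PySem.Dict String Int) key =>
      let parts0 : List String := [key]
      let parts1 : List String := pvSepsA.foldl (fun parts sep =>
          parts.foldl (fun new_parts p => new_parts ++ (PySem.Str.split? p sep).getD []) []) parts0
      let parts : List String := parts1.filter (fun p => !(p == ""))
      if parts = [] then counts
      else
        let depth : Int := min max_depth (parts.length : Int)
        let pfx : String := PySem.Str.join "." (PySem.List.slice parts none (some depth))
        counts.modify pfx 0 (· + 1))
    PySem.Dict.empty).items

-- ===== PORT B =====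
def pvSepsB : PySem.Set Char := PySem.Set.ofList ['.', '/', ':', '_']

-- ''.join(cur) on a list of single chars is String.ofList (exact)
def derive_schema_prefixes_alt (keys : List String) (max_depth : Int) : List (String × Int) :=
  (keys.foldl (fun (counts : PySem.Dict String Int) key =>
      let st : List String × List Char := key.toList.foldl
        (fun (st : List String × List Char) ch =>
          if ch ∈ pvSepsB then
            (if st.2 = [] then st else (st.1 ++ [String.ofList st.2], []))
          else (st.1, st.2 ++ [ch])) ([], [])
      let parts : List String := if st.2 = [] then st.1 else st.1 ++ [String.ofList st.2]
      if parts = [] then counts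
      else
        let depth : Int := min max_depth (parts.length : Int)
        counts.modify (PySem.Str.join "." (PySem.List.slice parts none (some depth))) 0 (· + 1))
    PySem.Dict.empty).items

-- ===== PRECONDITION & SPEC =====
def Spec_derive_schema_prefixes (keys : List String) (max_depth : Int) (out : List (String × Int)) : Prop := out = derive_schema_prefixes_alt keys max_depth
instance (keys : List String) (max_depth : Int) (out : List (String × Int)) : Decidable (Spec_derive_schema_prefixes keys max_depth out) := by unfold Spec_derive_schema_prefixes; infer_instance

-- ===== CLAIM (what is proved, stated in full; the proofs are below) =====
def Claim_equal_derive_schema_prefixes : Prop := ∀ (keys : List String) (max_depth : Int), Dom_derive_schema_prefixes keys max_depth → Spec_derive_schema_prefixes keys max_depth (derive_schema_prefixes keys max_depth)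

-- ===== LEMMAS AND PROOFS =====

/-- Splitting a char list on a predicate, keeping empty pieces:
returns (first piece, remaining pieces). -/
def spGo (p : Char → Bool) : List Char → List Char × List (List Char)
  | [] => ([], [])
  | x :: xs =>
    let r := spGo p xs
    if p x then ([], r.1 :: r.2) else (x :: r.1, r.2)

/-- All pieces (the Python split result, empties kept). -/
def sp (p : Char → Bool) (cs : List Char) : List (List Char) :=
  (spGo p cs).1 :: (spGo p cs).2

lemma sp_false (cs : List Char) : spGo (fun _ => false) cs = (cs, []) := by
  induction cs with
  | nil => rfl
  | cons x xs ih => simp [spGo, ih]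

lemma go_single (c : Char) :
    ∀ (l : List Char) (fuel : Nat) (cur : List Char) (acc : List (List Char)),
      l.length < fuel →
      PySem.Chars.splitOn.go [c] fuel l cur acc =
        acc.reverse ++ (cur.reverse ++ (spGo (· == c) l).1) :: (spGo (· == c) l).2 := by
  intro l
  induction l with
  | nil =>
    intro fuel cur acc h
    match fuel, h with
    | fuel+1, _ => simp [PySem.Chars.splitOn.go, spGo]
  | cons x xs ih =>
    intro fuel cur acc h
    match fuel, h with
    | fuel+1, h =>
      rw [PySem.Chars.splitOn.go]
      simp only [List.length_cons] at h
      by_cases hx : x = c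
      · subst hx
        have hp : [x].isPrefixOf (x :: xs) = true := by simp [List.isPrefixOf]
        rw [if_pos hp]
        simp only [List.length_cons, List.length_nil, List.drop_succ_cons, List.drop_zero]
        rw [ih fuel [] (cur.reverse :: acc) (by omega)]
        simp [spGo]
      · have hp : [c].isPrefixOf (x :: xs) = false := by
          simp [List.isPrefixOf]
          exact fun hcx => (hx hcx.symm).elim
        rw [if_neg (by simp [hp])]
        rw [ih fuel (x :: cur) acc (by omega)]
        simp [spGo, hx]

lemma splitOn_single (c : Char) (cs : List Char) :
    PySem.Chars.splitOn cs [c] = sp (· == c) cs := by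
  rw [PySem.Chars.splitOn, go_single c cs (cs.length + 1) [] [] (by omega)]
  simp [sp]

lemma merge_sp (p : Char → Bool) (c : Char) (cs : List Char) :
    (sp p cs).flatMap (sp (· == c)) = sp (fun x => p x || x == c) cs := by
  induction cs with
  | nil => simp [sp, spGo]
  | cons x xs ih =>
    simp only [sp] at ih ⊢
    rcases hq : spGo p xs with ⟨h, t⟩
    rcases hqq : spGo (fun x => p x || x == c) xs with ⟨H, T⟩
    rcases hqc : spGo (· == c) h with ⟨h1, t1⟩
    rw [hq, hqq] at ih
    simp only [List.flatMap_cons, sp, hqc] at ih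
    rw [List.cons_append, List.cons.injEq] at ih
    obtain ⟨ih1, ih2⟩ := ih
    simp only [spGo, hq, hqq]
    by_cases hp : p x
    · simp [sp, hp, List.flatMap_cons, hqc, ih1, ih2]
      exact ⟨rfl, rfl⟩
    · by_cases hc : x = c
      · subst hc
        simp [sp, hp, spGo, List.flatMap_cons, hqc, ih1, ih2]
      · simp [sp, hp, hc, spGo, List.flatMap_cons, hqc, ih1, ih2]

/-- One pass of A's per-separator splitting, on ofList-mapped parts. -/
lemma stepA (p : Char → Bool) (c : Char) (sep : String) (hs : sep.toList = [c]) (cs : List Char) :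
    ((sp p cs).map String.ofList).foldl
        (fun new_parts q => new_parts ++ (PySem.Str.split? q sep).getD []) []
      = (sp (fun x => p x || x == c) cs).map String.ofList := by
  rw [PySem.List.foldl_append_eq_flatMap]
  rw [List.flatMap_map]
  have hone : ∀ l : List Char,
      (PySem.Str.split? (String.ofList l) sep).getD [] = (sp (· == c) l).map String.ofList := by
    intro l
    simp [PySem.Str.split?, PySem.Chars.split?, hs, splitOn_single]
  simp only [hone]
  rw [← List.map_flatMap, merge_sp]
  simp

/-- B's character scan, as the filtered pieces of sp. -/
lemma scanB (P : Char → Prop) [DecidablePred P] :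
    ∀ (cs : List Char) (ps : List String) (cur : List Char),
      (let st := cs.foldl
          (fun (st : List String × List Char) ch =>
            if P ch then
              (if st.2 = [] then st else (st.1 ++ [String.ofList st.2], []))
            else (st.1, st.2 ++ [ch])) (ps, cur)
        if st.2 = [] then st.1 else st.1 ++ [String.ofList st.2])
      = ps ++ (((cur ++ (spGo (fun c => decide (P c)) cs).1) ::
                 (spGo (fun c => decide (P c)) cs).2).filter
                (fun t => !(t.isEmpty))).map String.ofList := by
  intro cs
  induction cs with
  | nil =>
    intro ps cur
    by_cases hc : cur = [] <;> simp [spGo, hc]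
  | cons ch cs ih =>
    intro ps cur
    simp only [List.foldl_cons]
    by_cases hP : P ch
    · by_cases hc : cur = []
      · subst hc
        simp only [if_pos hP, if_true]
        rw [ih ps []]
        simp [spGo, hP]
      · simp only [if_pos hP, if_neg hc]
        rw [ih (ps ++ [String.ofList cur]) []]
        simp [spGo, hP, hc]
    · simp only [if_neg hP]
      rw [ih ps (cur ++ [ch])]
      simp [spGo, hP]

lemma sp_congr (p q : Char → Bool) (cs : List Char) (h : ∀ x, p x = q x) :
    sp p cs = sp q cs := by
  have : p = q := funext h
  rw [this]

lemma filter_ofList (l : List (List Char)) :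
    (l.map String.ofList).filter (fun p => !(p == "")) =
      (l.filter (fun t => !(t.isEmpty))).map String.ofList := by
  rw [List.filter_map]
  congr 1
  apply List.filter_congr
  intro t _
  have h : (String.ofList t = "") ↔ t = [] := by
    constructor
    · intro h; have := congrArg String.toList h; simpa using this
    · intro h; simp [h]
  rw [Bool.eq_iff_iff]
  simp [h]

/-- Per key, A's four split passes plus the truthiness filter produce exactly
B's scanned token list. -/
lemma parts_eq (key : String) :
    ((pvSepsA.foldl (fun parts sep =>
        parts.foldl (fun new_parts p => new_parts ++ (PySem.Str.split? p sep).getD []) [])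
        [key]).filter (fun p => !(p == "")))
    = (let st := key.toList.foldl
          (fun (st : List String × List Char) ch =>
            if ch ∈ pvSepsB then
              (if st.2 = [] then st else (st.1 ++ [String.ofList st.2], []))
            else (st.1, st.2 ++ [ch])) ([], [])
        if st.2 = [] then st.1 else st.1 ++ [String.ofList st.2]) := by
  rw [scanB (· ∈ pvSepsB) key.toList [] []]
  have h0 : [key] = (sp (fun _ => false) key.toList).map String.ofList := by
    simp [sp, sp_false]
  rw [h0]
  simp only [pvSepsA]
  rw [List.foldl_cons]
  rw [stepA _ '.' "." rfl]
  rw [List.foldl_cons]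
  rw [stepA _ '/' "/" rfl]
  rw [List.foldl_cons]
  rw [stepA _ ':' ":" rfl]
  rw [List.foldl_cons]
  rw [stepA _ '_' "_" rfl]
  rw [List.foldl_nil, filter_ofList]
  simp only [List.nil_append]
  rw [sp_congr _ (fun c => decide (c ∈ pvSepsB)) key.toList
      (by intro x; simp [pvSepsB, PySem.Set.mem_ofList, Bool.or_assoc, beq_eq_decide])]
  rfl

-- ===== VERDICT (by name: the statement is the Claim_ definition above) =====
theorem derive_schema_prefixes_spec : Claim_equal_derive_schema_prefixes := by
  intro keys max_depth _
  unfold Spec_derive_schema_prefixes derive_schema_prefixes derive_schema_prefixes_alt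
  congr 1
  congr 1
  funext counts key
  simp only []
  rw [parts_eq key]
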